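-- pv_equiv track=rewrite | github.com/hugecookie/day05-obj | day05_01.py | calculate_fee
-- ===== SOURCE A (Python) =====
-- def calculate_fee(args):
--     """
--         놀이공원 요금 계산 프로그램
--         :param: 사람 수 arg
--         :total: {'num_of_people':전체 인원 수,
--                  num_of_adults: 어른 수,
--                  num_of_kids: 아이 수,
--                  total_amounts:지불할 총 이용료
--         """
--     total = 0
--     adults = 0
--     kids = 0
--     for i in args:
--         if i > 19:
--             total = total + 10000
--             adults += 1
--         else:
--             total = total + 3000
--             kids += 1
--     return {'num_of_people': len(args), 'num_of_adults': adults, 'num_of_kids': kids, 'total_amounts': total}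
-- ===== SOURCE B (Python) =====
-- def calculate_fee(args):
--     # Sort ascending, then binary-search the boundary between kids (<= 19)
--     # and adults (> 19); all four outputs follow in closed form.
--     s = sorted(args)
--     lo, hi = 0, len(s)
--     while lo < hi:
--         mid = (lo + hi) // 2
--         if s[mid] <= 19:
--             lo = mid + 1
--         else:
--             hi = mid
--     adults = len(s) - lo
--     kids = lo
--     return {'num_of_people': len(s), 'num_of_adults': adults,
--             'num_of_kids': kids, 'total_amounts': adults * 10000 + kids * 3000}
-- ===== Notes on version B (the rewrite author's own statement) =====
-- stated objective: alternative
-- what changed: Replaces A's single accumulating pass (running fee total plus adult/kid counters) with sort-then-binary-search: sort the ages, binary-search the kid/adult boundary (first index with age > 19), and derive counts and the total in closed form from that index.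
import Mathlib
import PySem

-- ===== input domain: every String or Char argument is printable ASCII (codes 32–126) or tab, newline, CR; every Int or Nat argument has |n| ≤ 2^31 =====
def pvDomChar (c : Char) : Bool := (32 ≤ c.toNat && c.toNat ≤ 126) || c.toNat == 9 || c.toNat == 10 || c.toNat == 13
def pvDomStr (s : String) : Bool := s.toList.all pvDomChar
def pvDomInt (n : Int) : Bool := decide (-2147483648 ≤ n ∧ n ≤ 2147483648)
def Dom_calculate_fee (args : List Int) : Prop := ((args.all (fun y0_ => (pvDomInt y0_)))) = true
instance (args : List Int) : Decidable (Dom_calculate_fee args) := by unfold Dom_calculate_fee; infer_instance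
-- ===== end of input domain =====

-- B replaces A's single accumulating pass (fee total + two counters) with
-- sort-then-binary-search for the kid/adult boundary, deriving all four
-- outputs in closed form from that index (alternative algorithm).

-- ===== PORT A =====
-- single pass, state (total, adults, kids) updated per element as in A's loop
def calculate_fee (args : List Int) : List (String × Int) :=
  let st := args.foldl
    (fun (st : Int × Int × Int) i =>
      if i > 19 then (st.1 + 10000, st.2.1 + 1, st.2.2)
      else (st.1 + 3000, st.2.1, st.2.2 + 1))
    (0, 0, 0)
  [("num_of_people", (args.length : Int)), ("num_of_adults", st.2.1),
   ("num_of_kids", st.2.2), ("total_amounts", st.1)]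

-- ===== PORT B =====
-- Source B's while-loop binary search; the index mid satisfies lo ≤ mid < hi ≤ len(s),
-- so s[mid] is always in range and getD is exact
-- fuel = hi - lo bounds the iteration count (a totality guard only)
def pvBisect (s : List Int) : Nat → Nat → Nat → Nat
  | 0, lo, _ => lo
  | fuel + 1, lo, hi =>
    if lo < hi then
      if s.getD ((lo + hi) / 2) 0 ≤ 19 then pvBisect s fuel ((lo + hi) / 2 + 1) hi
      else pvBisect s fuel lo ((lo + hi) / 2)
    else lo

def calculate_fee_alt (args : List Int) : List (String × Int) :=
  let s := PySem.List.sorted args (fun x => x) false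
  let lo := pvBisect s s.length 0 s.length
  let adults : Int := (s.length : Int) - (lo : Int)
  let kids : Int := (lo : Int)
  [("num_of_people", (s.length : Int)), ("num_of_adults", adults),
   ("num_of_kids", kids), ("total_amounts", adults * 10000 + kids * 3000)]

-- ===== PRECONDITION & SPEC =====
def Spec_calculate_fee (args : List Int) (out : List (String × Int)) : Prop := out = calculate_fee_alt args
instance (args : List Int) (out : List (String × Int)) : Decidable (Spec_calculate_fee args out) := by unfold Spec_calculate_fee; infer_instance

-- ===== CLAIM =====
def Claim_equal_calculate_fee : Prop := ∀ (args : List Int), Dom_calculate_fee args → Spec_calculate_fee args (calculate_fee args)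

-- ===== LEMMAS AND PROOFS =====

-- in a sorted list, the elements ≤ 19 are exactly the first countP of them
theorem charac (s : List Int) (h : s.Pairwise (· ≤ ·)) :
    ∀ i (hi : i < s.length),
      (s[i] ≤ 19 ↔ i < s.countP (fun x => decide (x ≤ 19))) := by
  induction s with
  | nil => intro i hi; simp at hi
  | cons x xs ih =>
    rcases List.pairwise_cons.mp h with ⟨hx, hxs⟩
    intro i hi
    cases i with
    | zero =>
      simp only [List.getElem_cons_zero, List.countP_cons]
      constructor
      · intro hle; simp [hle]
      · intro hpos
        by_contra hgt
        push Not at hgt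
        have hz : xs.countP (fun x => decide (x ≤ 19)) = 0 :=
          List.countP_eq_zero.mpr (fun a ha => by
            have := hx a ha; simp; omega)
        simp [hz, show ¬ (x ≤ 19) by omega] at hpos
    | succ j =>
      have hj : j < xs.length := by simpa using hi
      have := ih hxs j hj
      simp only [List.getElem_cons_succ, List.countP_cons]
      by_cases hxle : x ≤ 19
      · simp [hxle]; omega
      · have hz : xs.countP (fun x => decide (x ≤ 19)) = 0 :=
          List.countP_eq_zero.mpr (fun a ha => by
            have := hx a ha; simp; omega)
        simp [hz, show ¬ (x ≤ 19) by omega] at this ⊢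
        omega

-- the binary search finds the unique split point of a sorted list
theorem pvBisect_eq (s : List Int) (h : s.Pairwise (· ≤ ·)) :
    ∀ fuel lo hi, hi - lo ≤ fuel →
      lo ≤ s.countP (fun x => decide (x ≤ 19)) →
      s.countP (fun x => decide (x ≤ 19)) ≤ hi → hi ≤ s.length →
      pvBisect s fuel lo hi = s.countP (fun x => decide (x ≤ 19)) := by
  intro fuel
  induction fuel with
  | zero => intro lo hi hf h1 h2 h3; simp only [pvBisect]; omega
  | succ fuel ih =>
    intro lo hi hf h1 h2 h3
    by_cases hlt : lo < hi
    · rw [pvBisect, if_pos hlt]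
      have hm : (lo + hi) / 2 < s.length := by omega
      by_cases hle : s.getD ((lo + hi) / 2) 0 ≤ 19
      · rw [if_pos hle]
        rw [List.getD_eq_getElem s 0 hm] at hle
        have := (charac s h _ hm).mp hle
        exact ih _ _ (by omega) (by omega) h2 h3
      · rw [if_neg hle]
        rw [List.getD_eq_getElem s 0 hm] at hle
        have : ¬ ((lo + hi) / 2 < s.countP (fun x => decide (x ≤ 19))) := by
          intro hc; exact hle ((charac s h _ hm).mpr hc)
        exact ih _ _ (by omega) h1 (by omega) (by omega)
    · rw [pvBisect, if_neg hlt]; omega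

-- A's fold state in terms of the adult count and the length
theorem fee_fold_inv (args : List Int) (t a k : Int) :
    args.foldl
      (fun (st : Int × Int × Int) i =>
        if i > 19 then (st.1 + 10000, st.2.1 + 1, st.2.2)
        else (st.1 + 3000, st.2.1, st.2.2 + 1)) (t, a, k)
    = (let ad : Int := args.countP (fun i => decide (19 < i))
       (t + ad * 10000 + ((args.length : Int) - ad) * 3000, a + ad,
        k + (args.length : Int) - ad)) := by
  induction args generalizing t a k with
  | nil => simp
  | cons x xs ih =>
    simp only [List.foldl_cons, List.length_cons, List.countP_cons]
    by_cases hx : x > 19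
    · simp only [if_pos hx, ih, show decide (19 < x) = true by simpa using hx]
      refine Prod.ext ?_ (Prod.ext ?_ ?_) <;> push_cast <;> ring
    · simp only [if_neg hx, ih, show decide (19 < x) = false by simpa using hx]
      refine Prod.ext ?_ (Prod.ext ?_ ?_) <;> push_cast <;> ring

-- ===== VERDICT =====
theorem calculate_fee_spec : Claim_equal_calculate_fee := by
  intro args _
  show calculate_fee args = calculate_fee_alt args
  have hperm := PySem.List.sorted_perm args (fun x => x) false
  have hpw : (PySem.List.sorted args (fun x => x) false).Pairwise (· ≤ ·) := by
    simpa using PySem.List.sorted_pairwise args (fun x => x)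
  set s := PySem.List.sorted args (fun x => x) false with hs
  have hcle : s.countP (fun x => decide (x ≤ 19)) ≤ s.length :=
    List.countP_le_length
  have hbis : pvBisect s s.length 0 s.length = s.countP (fun x => decide (x ≤ 19)) :=
    pvBisect_eq s hpw s.length 0 s.length (by omega) (Nat.zero_le _) hcle le_rfl
  have hlen : s.length = args.length := hperm.length_eq
  have hsplit : s.countP (fun x => decide (x ≤ 19))
      + s.countP (fun i => decide (19 < i)) = s.length := by
    have := List.length_eq_countP_add_countP (l := s) (p := fun x => decide (x ≤ 19))
    rw [this]
    congr 1
    apply List.countP_congr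
    intro a _; simp
  have hcp : s.countP (fun i => decide (19 < i))
      = args.countP (fun i => decide (19 < i)) := hperm.countP_eq _
  simp only [calculate_fee, calculate_fee_alt, fee_fold_inv, ← hs]
  rw [hbis]
  simp only [List.cons.injEq, Prod.mk.injEq]
  refine ⟨⟨trivial, ?_⟩, ⟨trivial, ?_⟩, ⟨trivial, ?_⟩, ⟨trivial, ?_⟩, trivial⟩ <;> omega
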